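-- pv_equiv track=rewrite | github.com/Godley/Music-Library | implementation/primaries/ImportOnlineDBs/calculator.py | getPositionsForWord
-- ===== SOURCE A (Python) =====
-- def getPositionsForWord(position, total, columnCount, direction, length):
--     results = [position]
--     if direction == 6:
--         # north
--         for i in range(1, length):
--             newPosition = results[-1] - columnCount
--             results.append(newPosition)
--
--     if direction == 5:
--         # north west
--         for i in range(1, length):
--             newPosition = results[-1] - columnCount - 1
--             results.append(newPosition)
--
--     if direction == 7:
--         # north east
--         for i in range(1, length):
--             newPosition = results[-1] - columnCount + 1
--             results.append(newPosition)
--     return results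
-- ===== SOURCE B (Python) =====
-- def getPositionsForWord(position, total, columnCount, direction, length):
--     offsets = {6: -columnCount, 5: -columnCount - 1, 7: -columnCount + 1}
--     if direction not in offsets or length <= 1:
--         return [position]
--     step = offsets[direction]
--     return [position + i * step for i in range(length)]
-- ===== Notes on version B (the rewrite author's own statement) =====
-- stated objective: simpler
-- what changed: Replaces the three per-direction accumulator loops (each position derived from the previous) by a direction->offset table and a single closed-form comprehension position + i*offset.
import Mathlib
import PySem

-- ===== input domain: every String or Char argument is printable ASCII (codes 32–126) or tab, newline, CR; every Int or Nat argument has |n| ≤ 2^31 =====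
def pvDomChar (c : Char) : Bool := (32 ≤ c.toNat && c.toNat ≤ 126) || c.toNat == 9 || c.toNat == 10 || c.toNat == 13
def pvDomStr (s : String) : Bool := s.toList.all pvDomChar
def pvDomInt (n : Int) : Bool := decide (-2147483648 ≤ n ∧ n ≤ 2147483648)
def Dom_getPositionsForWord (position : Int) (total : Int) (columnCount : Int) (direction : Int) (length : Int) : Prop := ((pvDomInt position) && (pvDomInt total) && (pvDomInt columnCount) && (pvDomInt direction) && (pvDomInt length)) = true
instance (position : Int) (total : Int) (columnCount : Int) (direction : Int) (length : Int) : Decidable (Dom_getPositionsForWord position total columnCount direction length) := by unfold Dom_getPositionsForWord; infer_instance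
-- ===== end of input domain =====

-- B replaces A's three per-direction accumulator loops by a direction→offset dict lookup and a
-- single closed-form comprehension position + i*offset (objective: simpler).


-- ===== PORT A =====
-- results[-1] is ported as .getLast! — exact here because results is nonempty throughout.
def getPositionsForWord (position : Int) (total : Int) (columnCount : Int) (direction : Int) (length : Int) : List Int :=
  let results := [position]
  let results :=
    if direction = 6 then
      (PySem.List.pyRange 1 length 1).foldl (fun rs _ => rs ++ [rs.getLast! - columnCount]) results
    else results
  let results :=
    if direction = 5 then
      (PySem.List.pyRange 1 length 1).foldl (fun rs _ => rs ++ [rs.getLast! - columnCount - 1]) results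
    else results
  let results :=
    if direction = 7 then
      (PySem.List.pyRange 1 length 1).foldl (fun rs _ => rs ++ [rs.getLast! - columnCount + 1]) results
    else results
  results

-- ===== PORT B =====
def getPositionsForWord_alt (position : Int) (total : Int) (columnCount : Int) (direction : Int) (length : Int) : List Int :=
  match PySem.Dict.get?
      ((((PySem.Dict.empty).insert 6 (-columnCount)).insert 5 (-columnCount - 1)).insert 7 (-columnCount + 1))
      direction with
  | none => [position]
  | some step =>
      if length ≤ 1 then [position]
      else (PySem.List.pyRange 0 length 1).map (fun i => position + i * step)

-- ===== PRECONDITION & SPEC =====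
def Spec_getPositionsForWord (position : Int) (total : Int) (columnCount : Int) (direction : Int) (length : Int) (out : List Int) : Prop := out = getPositionsForWord_alt position total columnCount direction length
instance (position : Int) (total : Int) (columnCount : Int) (direction : Int) (length : Int) (out : List Int) : Decidable (Spec_getPositionsForWord position total columnCount direction length out) := by unfold Spec_getPositionsForWord; infer_instance

-- ===== CLAIM (what is proved, stated in full; the proofs are below) =====
def Claim_equal_getPositionsForWord : Prop := ∀ (position : Int) (total : Int) (columnCount : Int) (direction : Int) (length : Int), Dom_getPositionsForWord position total columnCount direction length → Spec_getPositionsForWord position total columnCount direction length (getPositionsForWord position total columnCount direction length)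

-- ===== LEMMAS AND PROOFS =====

lemma getLast!_concat_int (l : List Int) (a : Int) : (l ++ [a]).getLast! = a := by
  cases l with
  | nil => rfl
  | cons x t =>
      rw [List.cons_append, List.getLast!_cons_eq_getLastD, List.getLastD_concat]

-- A's accumulator loop "append previous + off", in closed form over the grid range.
lemma loop_closed (off p : Int) (L : Int) (hL : 1 ≤ L) :
    (PySem.List.pyRange 1 L 1).foldl (fun rs _ => rs ++ [rs.getLast! + off]) [p]
      = (PySem.List.pyRange 0 L 1).map (fun i => p + i * off) := by
  induction L, hL using Int.le_induction with
  | base =>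
      have h1 : PySem.List.pyRange 1 1 1 = [] := PySem.List.pyRange_one_eq_nil (le_refl 1)
      have h2 : PySem.List.pyRange 0 1 1 = [0] := by
        have := PySem.List.pyRange_one_singleton (a := (0 : Int)); simpa using this
      rw [h1, h2]
      simp
  | succ n hn ih =>
      rw [PySem.List.pyRange_one_succ_right (by omega : (1:Int) ≤ n), List.foldl_append, ih,
          PySem.List.pyRange_one_succ_right (by omega : (0:Int) ≤ n)]
      simp only [List.foldl_cons, List.foldl_nil, List.map_append, List.map_cons, List.map_nil]
      have hsplit : PySem.List.pyRange 0 n 1 = PySem.List.pyRange 0 (n-1) 1 ++ [n-1] := by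
        have h := PySem.List.pyRange_one_succ_right (by omega : (0:Int) ≤ n - 1)
        rw [show n - 1 + 1 = n from by ring] at h
        exact h
      rw [List.append_cancel_left_eq, hsplit, List.map_append]
      simp only [List.map_cons, List.map_nil]
      rw [getLast!_concat_int]
      congr 1
      ring

lemma loop_small (off p L : Int) (hL : L ≤ 1) :
    (PySem.List.pyRange 1 L 1).foldl (fun rs _ => rs ++ [rs.getLast! + off]) [p] = [p] := by
  rw [PySem.List.pyRange_one_eq_nil (by omega)]
  rfl

-- A in closed per-direction form
lemma A_eq_loop (p L off : Int)
    (hL : ¬ L ≤ 1) :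
    (PySem.List.pyRange 1 L 1).foldl (fun rs _ => rs ++ [rs.getLast! + off]) [p]
      = (PySem.List.pyRange 0 L 1).map (fun i => p + i * off) :=
  loop_closed off p L (by omega)

lemma body6 (c : Int) :
    (fun (rs : List Int) (_ : Int) => rs ++ [rs.getLast! - c])
      = (fun rs _ => rs ++ [rs.getLast! + (-c)]) := by
  funext rs x; rw [sub_eq_add_neg]

lemma body5 (c : Int) :
    (fun (rs : List Int) (_ : Int) => rs ++ [rs.getLast! - c - 1])
      = (fun rs _ => rs ++ [rs.getLast! + (-c - 1)]) := by
  funext rs x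
  have : rs.getLast! - c - 1 = rs.getLast! + (-c - 1) := by ring
  rw [this]

lemma body7 (c : Int) :
    (fun (rs : List Int) (_ : Int) => rs ++ [rs.getLast! - c + 1])
      = (fun rs _ => rs ++ [rs.getLast! + (-c + 1)]) := by
  funext rs x
  have : rs.getLast! - c + 1 = rs.getLast! + (-c + 1) := by ring
  rw [this]

-- ===== VERDICT (by name: the statement is the Claim_ definition above) =====
theorem getPositionsForWord_spec : Claim_equal_getPositionsForWord := by
  intro position total columnCount direction length _
  show getPositionsForWord position total columnCount direction length
      = getPositionsForWord_alt position total columnCount direction length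
  by_cases h6 : direction = 6
  · subst h6
    have hA : getPositionsForWord position total columnCount 6 length
        = (PySem.List.pyRange 1 length 1).foldl
            (fun rs _ => rs ++ [rs.getLast! - columnCount]) [position] := by
      unfold getPositionsForWord; norm_num
    rw [hA, body6]
    unfold getPositionsForWord_alt
    rw [PySem.Dict.get?_insert_of_ne _ _ (by norm_num : (6:Int) ≠ 7),
        PySem.Dict.get?_insert_of_ne _ _ (by norm_num : (6:Int) ≠ 5),
        PySem.Dict.get?_insert_self]
    by_cases hL : length ≤ 1
    · rw [loop_small _ _ _ hL]; simp [hL]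
    · rw [A_eq_loop _ _ _ hL]; simp [hL]
  by_cases h5 : direction = 5
  · subst h5
    have hA : getPositionsForWord position total columnCount 5 length
        = (PySem.List.pyRange 1 length 1).foldl
            (fun rs _ => rs ++ [rs.getLast! - columnCount - 1]) [position] := by
      unfold getPositionsForWord; norm_num
    rw [hA, body5]
    unfold getPositionsForWord_alt
    rw [PySem.Dict.get?_insert_of_ne _ _ (by norm_num : (5:Int) ≠ 7),
        PySem.Dict.get?_insert_self]
    by_cases hL : length ≤ 1
    · rw [loop_small _ _ _ hL]; simp [hL]
    · rw [A_eq_loop _ _ _ hL]; simp [hL]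
  by_cases h7 : direction = 7
  · subst h7
    have hA : getPositionsForWord position total columnCount 7 length
        = (PySem.List.pyRange 1 length 1).foldl
            (fun rs _ => rs ++ [rs.getLast! - columnCount + 1]) [position] := by
      unfold getPositionsForWord; norm_num
    rw [hA, body7]
    unfold getPositionsForWord_alt
    rw [PySem.Dict.get?_insert_self]
    by_cases hL : length ≤ 1
    · rw [loop_small _ _ _ hL]; simp [hL]
    · rw [A_eq_loop _ _ _ hL]; simp [hL]
  · have hA : getPositionsForWord position total columnCount direction length = [position] := by
      unfold getPositionsForWord
      simp [h5, h6, h7]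
    rw [hA]
    unfold getPositionsForWord_alt
    rw [PySem.Dict.get?_insert_of_ne _ _ h7, PySem.Dict.get?_insert_of_ne _ _ h5,
        PySem.Dict.get?_insert_of_ne _ _ h6]
    rfl
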